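-- pv_equiv track=rewrite | github.com/paluke/primetest | isprime.py | pairpow
-- ===== SOURCE A (Python) =====
-- def pairpow(a, m, d, n):
--     r = (1, 0)
--     while True:
--         if m % 2 == 1:
--             r = ((r[0] * a[0] + d * r[1] * a[1]) % n, (r[0] * a[1] + a[0] * r[1]) % n)
--         m = m >> 1
--         if m == 0:
--             break
--         a = ((2 * a[0] * a[0] + n - 1) % n, (2 * a[0] * a[1]) % n)
--     return r
-- ===== SOURCE B (Python) =====
-- def pairpow(a, m, d, n):
--     # Recursive exponentiation by squaring over the bits of m (same ring formulas as A).
--     if m == 0: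
--         return (1, 0)
--     rest = pairpow(((2 * a[0] * a[0] + n - 1) % n, (2 * a[0] * a[1]) % n), m >> 1, d, n)
--     if m % 2 == 1:
--         return ((rest[0] * a[0] + d * rest[1] * a[1]) % n, (rest[0] * a[1] + a[0] * rest[1]) % n)
--     return rest
-- ===== Notes on version B (the rewrite author's own statement) =====
-- stated objective: alternative
-- what changed: Replaces A's while-loop with an (r,a,m) accumulator state by a recursion over the bits of m (exponentiation by squaring written recursively: recurse on the squared base and m>>1, then multiply in the current base when the low bit is set), keeping A's exact ring-multiply and specialized squaring formulas; equality rests on commutativity/associativity of the ring product mod n.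
-- outside the precondition, e.g. on pairpow((1, 1), 3, 2, 0): A raises ZeroDivisionError, B raises ZeroDivisionError; on pairpow((1, 1), -1, 2, 5): A does not finish within the time limit, B raises RecursionError
import Mathlib
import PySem

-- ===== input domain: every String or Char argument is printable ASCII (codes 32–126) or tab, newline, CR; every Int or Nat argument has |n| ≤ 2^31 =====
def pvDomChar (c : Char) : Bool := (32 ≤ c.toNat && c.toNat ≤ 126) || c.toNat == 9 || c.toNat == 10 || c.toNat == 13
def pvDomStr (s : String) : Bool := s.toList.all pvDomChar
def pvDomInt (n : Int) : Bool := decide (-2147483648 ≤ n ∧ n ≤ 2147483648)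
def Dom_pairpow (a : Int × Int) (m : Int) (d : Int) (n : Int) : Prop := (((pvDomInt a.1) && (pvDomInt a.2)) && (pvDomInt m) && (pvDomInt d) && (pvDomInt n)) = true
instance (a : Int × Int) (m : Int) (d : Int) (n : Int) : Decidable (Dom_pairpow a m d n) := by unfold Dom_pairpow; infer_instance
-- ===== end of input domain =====

-- B replaces A's while-loop accumulator by a recursion over the bits of m (same ring
-- formulas); proved to return the same pair on every input where A returns.

-- ===== PORT A =====
-- A's `while True` loop, one recursive call per iteration over the state (r, a, m).
-- The `≤ 0` in the guard is a totality guard only: for m ≥ 0 it is exactly A's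
-- `if m == 0: break`, and for m < 0 (where Python A loops forever, outside Pre_) it stops.
def pairpowLoop (d n : Int) (r a : Int × Int) (m : Int) : Int × Int :=
  let r' := if PySem.Int.mod m 2 = 1 then
      (PySem.Int.mod (r.1 * a.1 + d * r.2 * a.2) n, PySem.Int.mod (r.1 * a.2 + a.1 * r.2) n)
    else r
  if _h : (m >>> (1 : Nat)) ≤ 0 then r'
  else pairpowLoop d n r'
    (PySem.Int.mod (2 * a.1 * a.1 + n - 1) n, PySem.Int.mod (2 * a.1 * a.2) n) (m >>> (1 : Nat))
termination_by m.toNat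
decreasing_by
  have h2 : m >>> (1 : Nat) = m / 2 := by
    rw [Int.shiftRight_eq_div_pow]; norm_num
  simp only [h2] at *; omega

def pairpow (a : Int × Int) (m : Int) (d : Int) (n : Int) : Int × Int :=
  pairpowLoop d n (1, 0) a m

-- ===== PORT B =====
-- B's recursion; the `m ≤ 0` test is B's `m == 0` base case plus a totality guard for m < 0
-- (where Python B hits the recursion limit, outside Pre_).
def pairpow_alt (a : Int × Int) (m : Int) (d : Int) (n : Int) : Int × Int :=
  if _h : m ≤ 0 then (1, 0)
  else
    let rest := pairpow_alt
      (PySem.Int.mod (2 * a.1 * a.1 + n - 1) n, PySem.Int.mod (2 * a.1 * a.2) n)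
      (m >>> (1 : Nat)) d n
    if PySem.Int.mod m 2 = 1 then
      (PySem.Int.mod (rest.1 * a.1 + d * rest.2 * a.2) n, PySem.Int.mod (rest.1 * a.2 + a.1 * rest.2) n)
    else rest
termination_by m.toNat
decreasing_by
  have h2 : m >>> (1 : Nat) = m / 2 := by
    rw [Int.shiftRight_eq_div_pow]; norm_num
  simp only [h2] at *; omega

-- ===== PRECONDITION & SPEC =====
-- Pre_ is exactly where Python A returns: m < 0 makes A's loop run forever, and n = 0 with
-- m ≥ 1 raises ZeroDivisionError at the first `% n`.
def Pre_pairpow (a : Int × Int) (m : Int) (d : Int) (n : Int) : Prop :=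
  0 ≤ m ∧ (n ≠ 0 ∨ m = 0)
instance (a : Int × Int) (m : Int) (d : Int) (n : Int) : Decidable (Pre_pairpow a m d n) := by
  unfold Pre_pairpow; infer_instance

def pvWitness_pairpow : (Int × Int) × Int × Int × Int := ((2, 1), 5, 3, 7)

def Spec_pairpow (a : Int × Int) (m : Int) (d : Int) (n : Int) (out : Int × Int) : Prop := out = pairpow_alt a m d n
instance (a : Int × Int) (m : Int) (d : Int) (n : Int) (out : Int × Int) : Decidable (Spec_pairpow a m d n out) := by unfold Spec_pairpow; infer_instance

-- ===== CLAIM (what is proved, stated in full; the proofs are below) =====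
def Claim_equal_pairpow : Prop := ∀ (a : Int × Int) (m : Int) (d : Int) (n : Int), Dom_pairpow a m d n → Pre_pairpow a m d n → Spec_pairpow a m d n (pairpow a m d n)

-- ===== LEMMAS AND PROOFS =====

-- The ring product both programs use, written with Int.fmod (= PySem.Int.mod).
def qmul (d n : Int) (x y : Int × Int) : Int × Int :=
  ((x.1 * y.1 + d * x.2 * y.2).fmod n, (x.1 * y.2 + y.1 * x.2).fmod n)

-- A's squaring step.
def qsq (n : Int) (a : Int × Int) : Int × Int :=
  ((2 * a.1 * a.1 + n - 1).fmod n, (2 * a.1 * a.2).fmod n)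

theorem pmod_eq_fmod (a b : Int) : PySem.Int.mod a b = Int.fmod a b := rfl

theorem shift_one (m : Int) : m >>> (1 : Nat) = m / 2 := by
  rw [Int.shiftRight_eq_div_pow]; norm_num

theorem fmod_congr {a b n : Int} (h : a % n = b % n) : a.fmod n = b.fmod n := by
  obtain ⟨k, hk⟩ := Int.ModEq.dvd (Int.ModEq.symm h)
  have : a = b + n * k := by linarith
  rw [this, Int.add_mul_fmod_self_left]

theorem fmod_modeq (a n : Int) : Int.ModEq n (a.fmod n) a := by
  unfold Int.ModEq
  rw [Int.fmod_def, Int.sub_mul_emod_self_left]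

theorem qmul_comm (d n : Int) (x y : Int × Int) : qmul d n x y = qmul d n y x := by
  unfold qmul
  rw [show x.1 * y.1 + d * x.2 * y.2 = y.1 * x.1 + d * y.2 * x.2 by ring,
      show x.1 * y.2 + y.1 * x.2 = y.1 * x.2 + x.1 * y.2 by ring]

theorem qmul_assoc (d n : Int) (x y z : Int × Int) :
    qmul d n (qmul d n x y) z = qmul d n x (qmul d n y z) := by
  have hA := fmod_modeq (x.1 * y.1 + d * x.2 * y.2) n
  have hB := fmod_modeq (x.1 * y.2 + y.1 * x.2) n
  have hC := fmod_modeq (y.1 * z.1 + d * y.2 * z.2) n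
  have hD := fmod_modeq (y.1 * z.2 + z.1 * y.2) n
  unfold qmul
  refine Prod.ext ?_ ?_ <;> dsimp only
  · apply fmod_congr
    have e1 := (hA.mul_right z.1).add ((hB.mul_left d).mul_right z.2)
    have e2 := (hC.mul_left x.1).add (hD.mul_left (d * x.2))
    have e3 : (x.1 * y.1 + d * x.2 * y.2) * z.1 + d * (x.1 * y.2 + y.1 * x.2) * z.2
        = x.1 * (y.1 * z.1 + d * y.2 * z.2) + d * x.2 * (y.1 * z.2 + z.1 * y.2) := by ring
    exact e1.trans (e3 ▸ e2.symm)
  · apply fmod_congr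
    have e1 := (hA.mul_right z.2).add (hB.mul_left z.1)
    have e2 := (hD.mul_left x.1).add (hC.mul_right x.2)
    have e3 : (x.1 * y.1 + d * x.2 * y.2) * z.2 + z.1 * (x.1 * y.2 + y.1 * x.2)
        = x.1 * (y.1 * z.2 + z.1 * y.2) + (y.1 * z.1 + d * y.2 * z.2) * x.2 := by ring
    exact e1.trans (e3 ▸ e2.symm)

theorem qmul_reduce_right (d n : Int) (x y : Int × Int) :
    qmul d n x (y.1.fmod n, y.2.fmod n) = qmul d n x y := by
  unfold qmul
  refine Prod.ext ?_ ?_ <;> dsimp only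
  · exact fmod_congr (((fmod_modeq y.1 n).mul_left x.1).add
      (((fmod_modeq y.2 n).mul_left (d * x.2))))
  · exact fmod_congr (((fmod_modeq y.2 n).mul_left x.1).add
      ((fmod_modeq y.1 n).mul_right x.2))

theorem qmul_one_left (d n : Int) (y : Int × Int) :
    qmul d n (1, 0) y = (y.1.fmod n, y.2.fmod n) := by
  unfold qmul
  norm_num

-- One unfolding of A's loop, phrased with qmul/qsq and `m / 2`.
theorem loop_step (d n : Int) (r a : Int × Int) (m : Int) :
    pairpowLoop d n r a m =
      if m / 2 ≤ 0 then (if m.fmod 2 = 1 then qmul d n r a else r)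
      else pairpowLoop d n (if m.fmod 2 = 1 then qmul d n r a else r) (qsq n a) (m / 2) := by
  rw [pairpowLoop.eq_def]
  simp only [pmod_eq_fmod, shift_one, qmul, qsq, dite_eq_ite]

-- One unfolding of B's recursion, phrased with qmul/qsq and `m / 2`.
theorem alt_step (a : Int × Int) (m d n : Int) :
    pairpow_alt a m d n =
      if m ≤ 0 then (1, 0)
      else if m.fmod 2 = 1 then qmul d n (pairpow_alt (qsq n a) (m / 2) d n) a
      else pairpow_alt (qsq n a) (m / 2) d n := by
  rw [pairpow_alt.eq_def]
  simp only [pmod_eq_fmod, shift_one, qmul, qsq, dite_eq_ite]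

theorem alt_zero (a : Int × Int) (d n : Int) : pairpow_alt a 0 d n = (1, 0) := by
  rw [alt_step]; norm_num

-- For m ≥ 1 the result of pairpow_alt is fmod-reduced in both components.
theorem alt_reduced (d n : Int) :
    ∀ (k : Nat) (m : Int), m.toNat = k → 1 ≤ m → ∀ (a : Int × Int),
      ((pairpow_alt a m d n).1.fmod n, (pairpow_alt a m d n).2.fmod n) = pairpow_alt a m d n := by
  intro k
  induction k using Nat.strong_induction_on with
  | _ k ih =>
    intro m hk hm a
    have hme : m.fmod 2 = m % 2 := Int.fmod_eq_emod_of_nonneg m (by norm_num)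
    rw [alt_step, if_neg (show ¬ m ≤ 0 by omega)]
    by_cases hodd : m.fmod 2 = 1
    · rw [if_pos hodd]
      simp only [qmul, Int.fmod_fmod]
    · rw [if_neg hodd]
      have hm2 : 1 ≤ m / 2 := by omega
      exact ih (m / 2).toNat (by omega) _ rfl hm2 _
  
-- Loop invariant: for m ≥ 1, A's loop from accumulator r equals r ⊗ (B's power).
theorem loop_eq_qmul_alt (d n : Int) :
    ∀ (k : Nat) (m : Int), m.toNat = k → 1 ≤ m → ∀ (a r : Int × Int),
      pairpowLoop d n r a m = qmul d n r (pairpow_alt a m d n) := by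
  intro k
  induction k using Nat.strong_induction_on with
  | _ k ih =>
    intro m hk hm a r
    have hme : m.fmod 2 = m % 2 := Int.fmod_eq_emod_of_nonneg m (by norm_num)
    rw [loop_step, alt_step, if_neg (show ¬ m ≤ 0 by omega)]
    by_cases hodd : m.fmod 2 = 1
    · rw [if_pos hodd, if_pos hodd]
      by_cases h0 : m / 2 ≤ 0
      · rw [if_pos h0, show m / 2 = 0 by omega, alt_zero, qmul_one_left, qmul_reduce_right]
      · rw [if_neg h0, ih (m / 2).toNat (by omega) _ rfl (by omega) (qsq n a) (qmul d n r a),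
            qmul_assoc, qmul_comm d n a]
    · rw [if_neg hodd, if_neg hodd]
      have h0 : ¬ m / 2 ≤ 0 := by omega
      rw [if_neg h0]
      exact ih (m / 2).toNat (by omega) _ rfl (by omega) _ _

-- ===== VERDICT (by name: the statement is the Claim_ definition above) =====
theorem pairpow_spec : Claim_equal_pairpow := by
  intro a m d n _hdom hpre
  show pairpow a m d n = pairpow_alt a m d n
  rcases (show 1 ≤ m ∨ m = 0 by rcases hpre with ⟨h1, _⟩; omega) with hm | hm
  · unfold pairpow
    rw [loop_eq_qmul_alt d n m.toNat m rfl hm, qmul_one_left,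
        alt_reduced d n m.toNat m rfl hm a]
  · subst hm
    unfold pairpow
    rw [loop_step, alt_zero]
    norm_num
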